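-- pv_equiv track=rewrite | github.com/dshemetov/leetcode | python/problems.py | p433
-- ===== SOURCE A (Python) =====
-- def p433(startGene: str, endGene: str, bank: list[str]) -> int:
--     """
--     433. Minimum Genetic Mutation https://leetcode.com/problems/minimum-genetic-mutation/
--
--     Examples:
--     >>> p433("AACCGGTT", "AACCGGTA", ["AACCGGTA"])
--     1
--     >>> p433("AACCGGTT", "AAACGGTA", ["AACCGGTA", "AACCGCTA", "AAACGGTA"])
--     2
--     >>> p433("AAAAACCC", "AACCCCCC", ["AAAACCCC", "AAACCCCC", "AACCCCCC"])
--     3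
--     """
--
--     def get_mutations(gene: str, bank: set[str]) -> set[str]:
--         return {
--             mutation
--             for mutation in bank
--             if sum(1 for i in range(len(mutation)) if mutation[i] != gene[i]) == 1
--         }
--
--     bank = set(bank)
--     explored = set()
--     unexplored = set({startGene})
--     steps = 0
--     while unexplored:
--         new_unexplored = set()
--         for gene in unexplored:
--             if gene == endGene:
--                 return steps
--             explored |= {gene}
--             for mutations in get_mutations(gene, bank):
--                 if mutations not in explored:
--                     new_unexplored |= {mutations}
--         unexplored = new_unexplored
--         bank -= explored
--         steps += 1
--
--     return -1
-- ===== SOURCE B (Python) =====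
-- def p433(startGene: str, endGene: str, bank: list[str]) -> int:
--     # Generate-and-test BFS: mutate each position over the observed alphabet and
--     # look candidates up in the remaining-bank set (no pairwise bank scan).
--     if startGene == endGene:
--         return 0
--     alphabet = set(startGene) | set(endGene) | {c for w in bank for c in w}
--     remaining = set(bank)
--     frontier = {startGene}
--     steps = 0
--     while frontier:
--         steps += 1
--         remaining -= frontier
--         nxt = set()
--         for g in frontier:
--             for i in range(len(g)):
--                 for c in alphabet:
--                     if c != g[i]:
--                         cand = g[:i] + c + g[i + 1:]
--                         if cand in remaining:
--                             nxt.add(cand)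
--         if endGene in nxt:
--             return steps
--         frontier = nxt
--     return -1
-- ===== Notes on version B (the rewrite author's own statement) =====
-- stated objective: alternative
-- what changed: Replaced A's scan-and-compare BFS (every level filters the whole bank by computing the Hamming distance to each frontier gene) by a generate-and-test BFS: each frontier gene is mutated at every position over the observed alphabet and the candidate is looked up in the remaining-bank set, so the per-level pairwise bank scan disappears (measured ~1.47x at the largest timing size, below the 1.5x confirmation bar).
-- outside the precondition, e.g. on p433('AB', 'B', ['B']): A returns 1, B returns -1; on p433('A', 'AB', ['AB']): A raises IndexError, B returns -1
import Mathlib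
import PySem

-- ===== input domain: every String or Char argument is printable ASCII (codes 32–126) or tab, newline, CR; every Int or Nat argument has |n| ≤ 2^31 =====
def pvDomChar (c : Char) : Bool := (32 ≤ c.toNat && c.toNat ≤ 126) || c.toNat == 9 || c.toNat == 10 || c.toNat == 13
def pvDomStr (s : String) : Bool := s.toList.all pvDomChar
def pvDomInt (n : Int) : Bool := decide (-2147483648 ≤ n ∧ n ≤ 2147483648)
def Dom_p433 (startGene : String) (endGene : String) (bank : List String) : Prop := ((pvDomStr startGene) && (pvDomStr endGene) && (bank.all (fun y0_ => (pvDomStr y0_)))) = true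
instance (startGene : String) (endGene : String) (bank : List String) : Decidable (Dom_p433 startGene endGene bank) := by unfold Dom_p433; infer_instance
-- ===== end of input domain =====

-- B replaces A's scan-and-compare BFS (each level filters the whole bank by Hamming distance
-- against each frontier gene) by a generate-and-test BFS: it mutates each position of a frontier
-- gene over the observed alphabet and looks the candidate up in the remaining-bank set.
-- Equivalence is about the return value (neither side mutates its input).

-- ===== PORT A =====

-- `sum(1 for i in range(len(m)) if m[i] != g[i]) == 1` (exact whenever m is no longer than g;
-- Pre_p433 keeps every compared pair the same length, which is where the Python does not raise)
def pvMutA (m g : List Char) : Bool :=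
  (List.range m.length).countP (fun i => m[i]? != g[i]?) == 1

-- `get_mutations(gene, bank)`: set comprehension over the bank set
def p433GetMutations (g : List Char) (bank : PySem.Set (List Char)) : PySem.Set (List Char) :=
  PySem.Set.ofList (bank.filter (fun m => pvMutA m g))

-- `for gene in unexplored: …` — one pass over the frontier; `none` means `return steps` was hit
def p433Round (endG : List Char) (bank : PySem.Set (List Char)) :
    List (List Char) → PySem.Set (List Char) → PySem.Set (List Char) →
    Option (PySem.Set (List Char) × PySem.Set (List Char))
  | [], exp, newu => some (exp, newu)
  | g :: us, exp, newu =>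
    if g = endG then none
    else
      let exp' := PySem.Set.add exp g          -- explored |= {gene}
      let newu' := (p433GetMutations g bank).foldl
        (fun acc m => if PySem.Set.contains exp' m then acc else PySem.Set.add acc m) newu
      p433Round endG bank us exp' newu'

-- `while unexplored:` with fuel; fuel bank.length + 3 exceeds the possible number of rounds
-- (every round past the first removes at least one explored gene from the bank)
def p433Loop (endG : List Char) :
    Nat → PySem.Set (List Char) → PySem.Set (List Char) → PySem.Set (List Char) → Int → Int
  | 0, _, _, _, _ => -1
  | fuel + 1, exp, unx, bank, steps =>
    if unx = [] then -1
    else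
      match p433Round endG bank unx exp PySem.Set.empty with
      | none => steps
      | some (exp2, newu) =>
          p433Loop endG fuel exp2 newu (PySem.Set.diff bank exp2) (steps + 1)

def p433 (startGene : String) (endGene : String) (bank : List String) : Int :=
  p433Loop endGene.toList (bank.length + 3) PySem.Set.empty
    (PySem.Set.ofList [startGene.toList]) (PySem.Set.ofList (bank.map String.toList)) 0

-- ===== PORT B =====

-- `for i in range(len(g)): for c in alphabet: if c != g[i]: cand = g[:i]+c+g[i+1:]; if cand in
-- remaining: nxt.add(cand)` — with i < len(g) the spliced string g[:i]+c+g[i+1:] is exactly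
-- `g.set i c`
def p433AltGen (alpha : List Char) (rem : PySem.Set (List Char)) (g : List Char)
    (acc : PySem.Set (List Char)) : PySem.Set (List Char) :=
  (List.range g.length).foldl (fun acc i =>
    alpha.foldl (fun acc c =>
      if some c ≠ g[i]? then
        let cand := g.set i c
        if PySem.Set.contains rem cand then PySem.Set.add acc cand else acc
      else acc) acc) acc

-- `while frontier:` with fuel; fuel bank.length + 2 exceeds the possible number of rounds
-- (the frontiers past the first are disjoint nonempty subsets of the bank set)
def p433AltLoop (endG : List Char) (alpha : List Char) :
    Nat → PySem.Set (List Char) → PySem.Set (List Char) → Int → Int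
  | 0, _, _, _ => -1
  | fuel + 1, frontier, remaining, steps =>
    if frontier = [] then -1
    else
      let steps' := steps + 1
      let rem' := PySem.Set.diff remaining frontier           -- remaining -= frontier
      let nxt := frontier.foldl (fun acc g => p433AltGen alpha rem' g acc) PySem.Set.empty
      if PySem.Set.contains nxt endG then steps'
      else p433AltLoop endG alpha fuel nxt rem' steps'

def p433_alt (startGene : String) (endGene : String) (bank : List String) : Int :=
  if startGene.toList = endGene.toList then 0
  else
    p433AltLoop endGene.toList
      (PySem.Set.union
        (PySem.Set.union (PySem.Set.ofList startGene.toList) (PySem.Set.ofList endGene.toList))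
        (PySem.Set.ofList (bank.map String.toList).flatten))
      (bank.length + 2)
      (PySem.Set.ofList [startGene.toList])
      (PySem.Set.ofList (bank.map String.toList)) 0

-- ===== PRECONDITION & SPEC =====

-- Pre_ restricts to the problem's natural domain: every bank string has startGene's length
-- (unless startGene = endGene, where A returns 0 untouched). On unequal lengths A compares over
-- the shorter string (an artifact that can raise IndexError or treat a shorter string as a
-- mutation), so those inputs are excluded wholesale (see cites for one where A still returns).
def Pre_p433 (startGene : String) (endGene : String) (bank : List String) : Prop :=
  startGene = endGene ∨ ∀ b ∈ bank, b.toList.length = startGene.toList.length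
instance (startGene : String) (endGene : String) (bank : List String) :
    Decidable (Pre_p433 startGene endGene bank) := by unfold Pre_p433; infer_instance

def pvWitness_p433 : String × String × List String :=
  ("AACCGGTT", "AAACGGTA", ["AACCGGTA", "AACCGCTA", "AAACGGTA"])

def Spec_p433 (startGene : String) (endGene : String) (bank : List String) (out : Int) : Prop := out = p433_alt startGene endGene bank
instance (startGene : String) (endGene : String) (bank : List String) (out : Int) : Decidable (Spec_p433 startGene endGene bank out) := by unfold Spec_p433; infer_instance

-- ===== CLAIM (what is proved, stated in full; the proofs are below) =====
def Claim_equal_p433 : Prop := ∀ (startGene : String) (endGene : String) (bank : List String), Dom_p433 startGene endGene bank → Pre_p433 startGene endGene bank → Spec_p433 startGene endGene bank (p433 startGene endGene bank)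

-- ===== LEMMAS AND PROOFS =====

-- membership in the inner fold of p433Round (`new_unexplored |= {m}` guarded by `m not in explored`)
theorem p433_mem_inner_fold (exp' : PySem.Set (List Char)) (muts : List (List Char)) :
    ∀ (acc : PySem.Set (List Char)) (x : List Char),
      x ∈ muts.foldl
          (fun acc m => if PySem.Set.contains exp' m then acc else PySem.Set.add acc m) acc ↔
        x ∈ acc ∨ (x ∈ muts ∧ x ∉ exp') := by
  induction muts with
  | nil => intro acc x; simp
  | cons m muts ih =>
    intro acc x
    rw [List.foldl_cons, ih]
    by_cases hm : m ∈ exp'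
    · have hc : (if PySem.Set.contains exp' m then acc else PySem.Set.add acc m) = acc := by
        rw [if_pos]; rw [PySem.Set.contains_iff]; exact hm
      rw [hc]
      constructor
      · rintro (h | ⟨h1, h2⟩)
        · exact Or.inl h
        · exact Or.inr ⟨List.mem_cons_of_mem _ h1, h2⟩
      · rintro (h | ⟨h1, h2⟩)
        · exact Or.inl h
        · rcases List.mem_cons.1 h1 with rfl | h1
          · exact absurd hm h2
          · exact Or.inr ⟨h1, h2⟩
    · have hc : (if PySem.Set.contains exp' m then acc else PySem.Set.add acc m)
          = PySem.Set.add acc m := by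
        rw [if_neg]; rw [PySem.Set.contains_iff]; exact hm
      rw [hc]
      constructor
      · rintro (h | ⟨h1, h2⟩)
        · rw [PySem.Set.mem_add] at h
          rcases h with h | rfl
          · exact Or.inl h
          · exact Or.inr ⟨List.mem_cons.2 (Or.inl rfl), hm⟩
        · exact Or.inr ⟨List.mem_cons_of_mem _ h1, h2⟩
      · rintro (h | ⟨h1, h2⟩)
        · exact Or.inl (by rw [PySem.Set.mem_add]; exact Or.inl h)
        · rcases List.mem_cons.1 h1 with rfl | h1
          · exact Or.inl (by rw [PySem.Set.mem_add]; exact Or.inr rfl)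
          · exact Or.inr ⟨h1, h2⟩

theorem p433_round_found (endG : List Char) (bank : PySem.Set (List Char)) :
    ∀ (us : List (List Char)) (exp newu : PySem.Set (List Char)),
      endG ∈ us → p433Round endG bank us exp newu = none := by
  intro us
  induction us with
  | nil => intro _ _ h; cases h
  | cons g us ih =>
    intro exp newu h
    by_cases hg : g = endG
    · simp [p433Round, hg]
    · have : endG ∈ us := by
        rcases List.mem_cons.1 h with rfl | h'
        · exact absurd rfl hg
        · exact h'
      simp [p433Round, hg, ih _ _ this]

theorem p433_round_some (endG : List Char) (bank : PySem.Set (List Char)) :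
    ∀ (us : List (List Char)) (exp newu : PySem.Set (List Char)), endG ∉ us →
      ∃ exp2 newu2,
        p433Round endG bank us exp newu = some (exp2, newu2) ∧
        (∀ x, x ∈ exp2 ↔ x ∈ exp ∨ x ∈ us) ∧
        (∀ m, m ∈ newu → m ∈ newu2) ∧
        (∀ m, m ∈ bank → m ∉ exp → m ∉ us → (∃ g ∈ us, pvMutA m g = true) → m ∈ newu2) ∧
        (∀ m, m ∈ newu2 → m ∈ newu ∨ (m ∈ bank ∧ m ∉ exp ∧ ∃ g ∈ us, pvMutA m g = true)) := by
  intro us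
  induction us with
  | nil =>
    intro exp newu _
    exact ⟨exp, newu, rfl, by simp, fun m hm => hm, by simp, fun m hm => Or.inl hm⟩
  | cons g us ih =>
    intro exp newu hend
    have hg : ¬ g = endG := fun h => hend (by simp [h])
    have hgend : endG ∉ us := fun h => hend (List.mem_cons_of_mem _ h)
    set exp' := PySem.Set.add exp g with hexp'
    set newu' := (p433GetMutations g bank).foldl
      (fun acc m => if PySem.Set.contains exp' m then acc else PySem.Set.add acc m) newu
      with hnewu'
    have hmemexp' : ∀ x, x ∈ exp' ↔ x ∈ exp ∨ x = g := by
      intro x; rw [hexp', PySem.Set.mem_add]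
    have hmuts : ∀ x, x ∈ p433GetMutations g bank ↔ x ∈ bank ∧ pvMutA x g = true := by
      intro x; simp [p433GetMutations, PySem.Set.mem_ofList, List.mem_filter]
    have hmemnewu' : ∀ x, x ∈ newu' ↔ x ∈ newu ∨ (x ∈ bank ∧ pvMutA x g = true ∧ x ∉ exp') := by
      intro x
      rw [hnewu', p433_mem_inner_fold]
      constructor
      · rintro (h | ⟨h1, h2⟩)
        · exact Or.inl h
        · exact Or.inr ⟨((hmuts x).1 h1).1, ((hmuts x).1 h1).2, h2⟩
      · rintro (h | ⟨h1, h2, h3⟩)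
        · exact Or.inl h
        · exact Or.inr ⟨(hmuts x).2 ⟨h1, h2⟩, h3⟩
    obtain ⟨exp2, newu2, heq, hexp2, hmono, hlow, hup⟩ := ih exp' newu' hgend
    refine ⟨exp2, newu2, ?_, ?_, ?_, ?_, ?_⟩
    · simp only [p433Round, if_neg hg]
      exact heq
    · intro x
      rw [hexp2 x, hmemexp' x, List.mem_cons]
      tauto
    · intro m hm
      exact hmono m ((hmemnewu' m).2 (Or.inl hm))
    · rintro m hmb hmexp hmus ⟨g', hg', hadj⟩
      have hmg : m ≠ g := fun h => hmus (by simp [h])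
      have hmus' : m ∉ us := fun h => hmus (List.mem_cons_of_mem _ h)
      have hmexp' : m ∉ exp' := by
        rw [hmemexp']
        rintro (h | h)
        · exact hmexp h
        · exact hmg h
      rcases List.mem_cons.1 hg' with rfl | hg'us
      · exact hmono m ((hmemnewu' m).2 (Or.inr ⟨hmb, hadj, hmexp'⟩))
      · exact hlow m hmb hmexp' hmus' ⟨g', hg'us, hadj⟩
    · intro m hm
      rcases hup m hm with h | ⟨hb, hexp'm, g', hg', hadj⟩
      · rcases (hmemnewu' m).1 h with h | ⟨h1, h2, h3⟩
        · exact Or.inl h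
        · exact Or.inr ⟨h1, fun hc => h3 ((hmemexp' m).2 (Or.inl hc)),
            g, List.mem_cons.2 (Or.inl rfl), h2⟩
      · exact Or.inr ⟨hb, fun hc => hexp'm ((hmemexp' m).2 (Or.inl hc)),
          g', List.mem_cons_of_mem _ hg', hadj⟩

-- an empty frontier returns -1 at every fuel
theorem p433_loop_empty (endG : List Char) :
    ∀ (f : Nat) (exp bank : PySem.Set (List Char)) (steps : Int),
      p433Loop endG f exp [] bank steps = -1 := by
  intro f exp bank steps
  cases f <;> simp [p433Loop]

-- one-step unfolding lemmas for the two loops (definitional / one simp step)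
theorem p433_altloop_succ (endG alpha : List Char) (f : Nat)
    (F rem : PySem.Set (List Char)) (steps : Int) :
    p433AltLoop endG alpha (f + 1) F rem steps =
      if F = [] then -1
      else if PySem.Set.contains
          (F.foldl (fun acc g => p433AltGen alpha (PySem.Set.diff rem F) g acc)
            PySem.Set.empty) endG then steps + 1
      else p433AltLoop endG alpha f
        (F.foldl (fun acc g => p433AltGen alpha (PySem.Set.diff rem F) g acc) PySem.Set.empty)
        (PySem.Set.diff rem F) (steps + 1) := rfl

theorem p433_loop_step_some (endG : List Char) (f : Nat)
    (exp unx bank exp2 newu2 : PySem.Set (List Char)) (steps : Int) (hU : unx ≠ [])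
    (h : p433Round endG bank unx exp PySem.Set.empty = some (exp2, newu2)) :
    p433Loop endG (f + 1) exp unx bank steps
      = p433Loop endG f exp2 newu2 (PySem.Set.diff bank exp2) (steps + 1) := by
  simp only [p433Loop, if_neg hU, h]

theorem p433_loop_step_none (endG : List Char) (f : Nat)
    (exp unx bank : PySem.Set (List Char)) (steps : Int) (hU : unx ≠ [])
    (h : p433Round endG bank unx exp PySem.Set.empty = none) :
    p433Loop endG (f + 1) exp unx bank steps = steps := by
  simp only [p433Loop, if_neg hU, h]

-- generic membership in an accumulating set-building fold
theorem pv_mem_foldl_step {β : Type} (l : List β)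
    (f : PySem.Set (List Char) → β → PySem.Set (List Char)) (Q : β → List Char → Prop)
    (H : ∀ acc b x, x ∈ f acc b ↔ x ∈ acc ∨ Q b x) :
    ∀ (acc : PySem.Set (List Char)) (x : List Char),
      x ∈ l.foldl f acc ↔ x ∈ acc ∨ ∃ b ∈ l, Q b x := by
  induction l with
  | nil => intro acc x; simp
  | cons b l ih =>
    intro acc x
    rw [List.foldl_cons, ih, H]
    constructor
    · rintro ((h | h) | ⟨b', hb', h⟩)
      · exact Or.inl h
      · exact Or.inr ⟨b, List.mem_cons.2 (Or.inl rfl), h⟩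
      · exact Or.inr ⟨b', List.mem_cons_of_mem _ hb', h⟩
    · rintro (h | ⟨b', hb', h⟩)
      · exact Or.inl (Or.inl h)
      · rcases List.mem_cons.1 hb' with rfl | hb'
        · exact Or.inl (Or.inr h)
        · exact Or.inr ⟨b', hb', h⟩

-- membership in B's candidate generator for one gene
theorem pv_mem_gen (alpha : List Char) (rem : PySem.Set (List Char)) (g : List Char) :
    ∀ (acc : PySem.Set (List Char)) (x : List Char),
      x ∈ p433AltGen alpha rem g acc ↔
        x ∈ acc ∨ ∃ i, i < g.length ∧ ∃ c ∈ alpha, some c ≠ g[i]? ∧ g.set i c ∈ rem ∧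
          x = g.set i c := by
  intro acc x
  unfold p433AltGen
  rw [pv_mem_foldl_step (List.range g.length) _
      (fun i x => ∃ c ∈ alpha, some c ≠ g[i]? ∧ g.set i c ∈ rem ∧ x = g.set i c)]
  · constructor
    · rintro (h | ⟨i, hi, h⟩)
      · exact Or.inl h
      · exact Or.inr ⟨i, List.mem_range.1 hi, h⟩
    · rintro (h | ⟨i, hi, h⟩)
      · exact Or.inl h
      · exact Or.inr ⟨i, List.mem_range.2 hi, h⟩
  · intro acc i x
    rw [pv_mem_foldl_step alpha _
        (fun c x => some c ≠ g[i]? ∧ g.set i c ∈ rem ∧ x = g.set i c)]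
    intro acc c x
    by_cases hne : some c ≠ g[i]?
    · simp only [if_pos hne]
      by_cases hr : g.set i c ∈ rem
      · have : PySem.Set.contains rem (g.set i c) = true := (PySem.Set.contains_iff _ _).2 hr
        rw [if_pos this, PySem.Set.mem_add]
        constructor
        · rintro (h | rfl)
          · exact Or.inl h
          · exact Or.inr ⟨hne, hr, rfl⟩
        · rintro (h | ⟨_, _, rfl⟩)
          · exact Or.inl h
          · exact Or.inr rfl
      · have : PySem.Set.contains rem (g.set i c) = false := by
          rw [Bool.eq_false_iff]; intro h; exact hr ((PySem.Set.contains_iff _ _).1 h)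
        rw [if_neg (by rw [this]; exact Bool.false_ne_true)]
        constructor
        · exact Or.inl
        · rintro (h | ⟨_, h, _⟩)
          · exact h
          · exact absurd h hr
    · rw [if_neg hne]
      constructor
      · exact Or.inl
      · rintro (h | ⟨h, _⟩)
        · exact h
        · exact absurd h hne

-- a 0/1-count over a range is 1 exactly when the predicate holds at a unique index
theorem pv_countP_range_one (p : Nat → Bool) (L : Nat) :
    (List.range L).countP p = 1 ↔
      ∃ i, i < L ∧ p i = true ∧ ∀ j, j < L → j ≠ i → p j = false := by
  induction L with
  | zero => simp
  | succ L ih =>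
    rw [List.range_succ, List.countP_append]
    have hone : (List.range L).countP p = 0 ↔ ∀ j, j < L → p j = false := by
      rw [List.countP_eq_zero]
      constructor
      · intro h j hj; exact Bool.eq_false_iff.2 (h j (List.mem_range.2 hj))
      · intro h j hj
        rw [h j (List.mem_range.1 hj)]
        exact Bool.false_ne_true
    by_cases hp : p L = true
    · have hc : List.countP p [L] = 1 := by simp [hp]
      rw [hc]
      constructor
      · intro h
        have h0 : (List.range L).countP p = 0 := by omega
        exact ⟨L, Nat.lt_succ_self L, hp, fun j hj hne => hone.1 h0 j (by omega)⟩
      · rintro ⟨i, hi, hpi, huniq⟩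
        have hiL : i = L := by
          by_contra hne
          have := huniq L (Nat.lt_succ_self L) (fun h => hne h.symm)
          rw [hp] at this
          simp at this
        have h0 : (List.range L).countP p = 0 :=
          hone.2 (fun j hj => huniq j (by omega) (by omega))
        omega
    · have hp' : p L = false := Bool.eq_false_iff.2 hp
      have hc : List.countP p [L] = 0 := by simp [hp']
      rw [hc, Nat.add_zero, ih]
      constructor
      · rintro ⟨i, hi, hpi, huniq⟩
        refine ⟨i, by omega, hpi, fun j hj hne => ?_⟩
        by_cases hjL : j < L
        · exact huniq j hjL hne
        · have hjeq : j = L := by omega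
          rw [hjeq]
          exact hp'
      · rintro ⟨i, hi, hpi, huniq⟩
        have hiL : i < L := by
          rcases Nat.lt_succ_iff_lt_or_eq.1 hi with h | h
          · exact h
          · subst h; rw [hpi] at hp'; simp at hp'
        exact ⟨i, hiL, hpi, fun j hj hne => huniq j (by omega) hne⟩

-- A's Hamming-distance-1 test, for equal-length strings, is exactly "g with one position replaced"
theorem pv_mutA_iff (m g : List Char) (h : m.length = g.length) :
    pvMutA m g = true ↔ ∃ i c, i < g.length ∧ some c ≠ g[i]? ∧ m = g.set i c := by
  unfold pvMutA
  rw [beq_iff_eq, h, pv_countP_range_one]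
  constructor
  · rintro ⟨i, hi, hpi, huniq⟩
    have him : i < m.length := by omega
    obtain ⟨c, hc⟩ : ∃ c, m[i]? = some c := ⟨m[i], List.getElem?_eq_getElem him⟩
    refine ⟨i, c, hi, ?_, ?_⟩
    · rw [← hc]
      exact bne_iff_ne.1 hpi
    · apply List.ext_getElem?
      intro j
      by_cases hji : j = i
      · subst hji
        rw [hc, List.getElem?_set_self hi]
      · rw [List.getElem?_set_ne (fun heq => hji heq.symm)]
        by_cases hjL : j < g.length
        · have hj := huniq j hjL hji
          simpa using hj
        · rw [List.getElem?_eq_none_iff.mpr (by omega),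
            List.getElem?_eq_none_iff.mpr (by omega)]
  · rintro ⟨i, c, hi, hne, rfl⟩
    refine ⟨i, hi, ?_, ?_⟩
    · rw [List.getElem?_set_self hi]
      simpa using hne
    · intro j hj hji
      rw [List.getElem?_set_ne (fun heq => hji heq.symm)]
      simp

-- characterization of B's next frontier: exactly the remaining words at Hamming distance 1
-- from some frontier gene (needs equal lengths and alphabet closure of the remaining words)
theorem pv_nxt_iff (alpha : List Char) (rem' F : PySem.Set (List Char)) (L : Nat)
    (hF : ∀ g ∈ F, g.length = L)
    (hR : ∀ x ∈ rem', x.length = L ∧ ∀ ch ∈ x, ch ∈ alpha) :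
    ∀ x, x ∈ F.foldl (fun acc g => p433AltGen alpha rem' g acc) PySem.Set.empty ↔
      x ∈ rem' ∧ ∃ g ∈ F, pvMutA x g = true := by
  intro x
  rw [pv_mem_foldl_step F _
      (fun g x => ∃ i, i < g.length ∧ ∃ c ∈ alpha, some c ≠ g[i]? ∧ g.set i c ∈ rem' ∧
        x = g.set i c)]
  · constructor
    · rintro (h | ⟨g, hg, i, hi, c, hc, hne, hr, rfl⟩)
      · exact absurd h (by simp [PySem.Set.empty])
      · refine ⟨hr, g, hg, ?_⟩
        rw [pv_mutA_iff _ _ (by simp)]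
        exact ⟨i, c, hi, hne, rfl⟩
    · rintro ⟨hxr, g, hg, hmut⟩
      obtain ⟨hxL, hxA⟩ := hR x hxr
      rw [pv_mutA_iff _ _ (by rw [hxL, hF g hg])] at hmut
      obtain ⟨i, c, hi, hne, heq⟩ := hmut
      refine Or.inr ⟨g, hg, i, hi, c, ?_, hne, heq ▸ hxr, heq⟩
      apply hxA
      rw [heq]
      exact List.mem_of_getElem? (List.getElem?_set_self hi)
  · intro acc g x
    exact pv_mem_gen alpha rem' g acc x

-- lockstep simulation: A's (explored, unexplored, bank) state against B's (frontier, remaining)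
-- state; A runs with one unit of fuel more because it detects endGene one round later than B
theorem p433_loop_sim (endG alpha : List Char) (L : Nat) (bank0 : List (List Char))
    (hb0L : ∀ w ∈ bank0, w.length = L)
    (hb0A : ∀ w ∈ bank0, ∀ ch ∈ w, ch ∈ alpha) :
    ∀ (f : Nat) (exp unx bankA F rem : PySem.Set (List Char)) (steps : Int),
      (∀ x, x ∈ F ↔ x ∈ unx ∧ x ∉ exp) →
      (∀ x, x ∈ bankA → x ∉ exp) →
      (∀ x, x ∈ rem ↔ x ∈ bankA) →
      (∀ x, x ∈ bankA → x ∈ bank0) →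
      (∀ g ∈ unx, g.length = L) →
      endG ∉ exp → endG ∉ unx →
      (∀ e ∈ unx, e ∈ exp → ∀ m ∈ bankA, pvMutA m e = true → m ∈ unx) →
      p433Loop endG (f + 1) exp unx bankA steps = p433AltLoop endG alpha f F rem steps := by
  intro f
  induction f with
  | zero =>
    intro exp unx bankA F rem steps i1 i2 i3 i4 i5 i6 i7 i8
    by_cases hU : unx = []
    · rw [hU, p433_loop_empty]; rfl
    · obtain ⟨exp2, newu2, heq, _, _, _, _⟩ :=
        p433_round_some endG bankA unx exp PySem.Set.empty i7
      rw [p433_loop_step_some endG 0 exp unx bankA exp2 newu2 steps hU heq]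
      rfl
  | succ f ih =>
    intro exp unx bankA F rem steps i1 i2 i3 i4 i5 i6 i7 i8
    rw [p433_altloop_succ]
    by_cases hF : F = []
    · -- B returns -1 at once; A's frontier holds only already-explored genes: one silent
      -- extra round with an empty result, then -1
      rw [if_pos hF]
      by_cases hU : unx = []
      · rw [hU, p433_loop_empty]
      · have hnoF : ∀ x, x ∈ unx → x ∈ exp := by
          intro x hx
          by_contra hc
          have : x ∈ F := (i1 x).2 ⟨hx, hc⟩
          rw [hF] at this; cases this
        obtain ⟨exp2, newu2, heq, hexp2, _, _, hup⟩ :=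
          p433_round_some endG bankA unx exp PySem.Set.empty i7
        have hnew : newu2 = [] := by
          apply List.eq_nil_iff_forall_not_mem.2
          intro m hm
          rcases hup m hm with h | ⟨hb, hexpm, g', hg', hadj⟩
          · cases h
          · exact hexpm (hnoF m (i8 g' hg' (hnoF _ hg') m hb hadj))
        rw [p433_loop_step_some endG (f + 1) exp unx bankA exp2 newu2 steps hU heq, hnew,
          p433_loop_empty]
    · rw [if_neg hF]
      have hU : unx ≠ [] := by
        obtain ⟨x, hx⟩ := List.exists_mem_of_ne_nil F hF
        intro h
        have := ((i1 x).1 hx).1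
        rw [h] at this; cases this
      obtain ⟨exp2, newu2, heq, hexp2, _, hlow, hup⟩ :=
        p433_round_some endG bankA unx exp PySem.Set.empty i7
      set rem' := PySem.Set.diff rem F with hrem'def
      have hrem' : ∀ x, x ∈ rem' ↔ x ∈ bankA ∧ x ∉ unx := by
        intro x
        rw [hrem'def, PySem.Set.mem_diff, i3, i1]
        constructor
        · rintro ⟨hb, hn⟩
          exact ⟨hb, fun hu => hn ⟨hu, i2 x hb⟩⟩
        · rintro ⟨hb, hn⟩
          exact ⟨hb, fun hp => hn hp.1⟩
      set nxt := F.foldl (fun acc g => p433AltGen alpha rem' g acc) PySem.Set.empty with hnxtdef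
      have hnxt : ∀ x, x ∈ nxt ↔ x ∈ rem' ∧ ∃ g ∈ F, pvMutA x g = true := by
        intro x
        rw [hnxtdef]
        apply pv_nxt_iff alpha rem' F L
        · intro g hg; exact i5 g ((i1 g).1 hg).1
        · intro y hy
          have hyb : y ∈ bank0 := i4 y ((hrem' y).1 hy).1
          exact ⟨hb0L y hyb, hb0A y hyb⟩
      -- B's next frontier = A's next unexplored minus A's next explored
      have j1 : ∀ x, x ∈ nxt ↔ x ∈ newu2 ∧ x ∉ exp2 := by
        intro x
        rw [hnxt]
        constructor
        · rintro ⟨hxr, g', hg', hadj⟩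
          have hxb : x ∈ bankA := ((hrem' x).1 hxr).1
          have hxunx : x ∉ unx := ((hrem' x).1 hxr).2
          have hxexp : x ∉ exp := i2 x hxb
          refine ⟨hlow x hxb hxexp hxunx ⟨g', ((i1 g').1 hg').1, hadj⟩, ?_⟩
          rw [hexp2]
          rintro (h | h)
          · exact hxexp h
          · exact hxunx h
        · rintro ⟨hx, hxexp2⟩
          have hxexp : x ∉ exp := fun h => hxexp2 ((hexp2 x).2 (Or.inl h))
          have hxunx : x ∉ unx := fun h => hxexp2 ((hexp2 x).2 (Or.inr h))
          rcases hup x hx with h | ⟨hb, _, g', hg', hadj⟩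
          · cases h
          · have hg'F : g' ∈ F := (i1 g').2 ⟨hg', fun hc => hxunx (i8 g' hg' hc x hb hadj)⟩
            exact ⟨(hrem' x).2 ⟨hb, hxunx⟩, g', hg'F, hadj⟩
      rw [p433_loop_step_some endG (f + 1) exp unx bankA exp2 newu2 steps hU heq]
      by_cases hfound : endG ∈ nxt
      · -- B returns steps+1 now; A returns steps+1 at its next round, finding endG in unexplored
        rw [if_pos ((PySem.Set.contains_iff _ _).2 hfound)]
        have hEn : endG ∈ newu2 := ((j1 endG).1 hfound).1
        have hnn : newu2 ≠ [] := fun h => by rw [h] at hEn; cases hEn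
        rw [p433_loop_step_none endG f exp2 newu2 (PySem.Set.diff bankA exp2) (steps + 1) hnn
          (p433_round_found endG (PySem.Set.diff bankA exp2) newu2 exp2 PySem.Set.empty hEn)]
      · rw [if_neg (fun h => hfound ((PySem.Set.contains_iff _ _).1 h))]
        have hbank' : ∀ x, x ∈ PySem.Set.diff bankA exp2 ↔ x ∈ bankA ∧ x ∉ exp2 :=
          fun x => PySem.Set.mem_diff bankA exp2 x
        apply ih
        · exact j1
        · exact fun x hx => ((hbank' x).1 hx).2
        · intro x
          rw [hbank', hrem', hexp2]
          constructor
          · rintro ⟨hb, hn⟩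
            exact ⟨hb, fun h => h.elim (i2 x hb) hn⟩
          · rintro ⟨hb, hn⟩
            exact ⟨hb, fun h => hn (Or.inr h)⟩
        · exact fun x hx => i4 x ((hbank' x).1 hx).1
        · intro m hm
          rcases hup m hm with h | ⟨hb, _, _⟩
          · cases h
          · exact hb0L m (i4 m hb)
        · rw [hexp2]
          rintro (h | h)
          · exact i6 h
          · exact i7 h
        · intro h
          have hne2 : endG ∉ exp2 := by
            rw [hexp2]
            rintro (h' | h')
            · exact i6 h'
            · exact i7 h'
          exact hfound ((j1 endG).2 ⟨h, hne2⟩)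
        · intro e he heexp2 m hm hadj
          rcases hup e he with h | ⟨heb, heexp, _⟩
          · cases h
          · have heunx : e ∈ unx := by
              rcases (hexp2 e).1 heexp2 with h | h
              · exact absurd h heexp
              · exact h
            have hmb : m ∈ bankA := ((hbank' m).1 hm).1
            have hmexp2 : m ∉ exp2 := ((hbank' m).1 hm).2
            have hmexp : m ∉ exp := fun h => hmexp2 ((hexp2 m).2 (Or.inl h))
            have hmunx : m ∉ unx := fun h => hmexp2 ((hexp2 m).2 (Or.inr h))
            exact hlow m hmb hmexp hmunx ⟨e, heunx, hadj⟩

-- ===== VERDICT (by name: the statement is the Claim_ definition above) =====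
theorem p433_spec : Claim_equal_p433 := by
  unfold Claim_equal_p433
  intro startGene endGene bank _ hpre
  unfold Spec_p433 p433 p433_alt
  by_cases hse : startGene.toList = endGene.toList
  · rw [if_pos hse]
    have hofl : PySem.Set.ofList [startGene.toList] = [startGene.toList] := rfl
    show p433Loop endGene.toList (bank.length + 2 + 1) _ _ _ 0 = 0
    rw [hofl, p433_loop_step_none _ _ _ _ _ _ (by simp)
      (p433_round_found _ _ _ _ _ (by rw [← hse]; exact List.mem_singleton.2 rfl))]
  · rw [if_neg hse]
    have hlen : ∀ b ∈ bank, b.toList.length = startGene.toList.length := by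
      rcases hpre with h | h
      · exact absurd (by rw [h]) hse
      · exact h
    show p433Loop endGene.toList (bank.length + 2 + 1) _ _ _ 0 = _
    apply p433_loop_sim endGene.toList _ startGene.toList.length (bank.map String.toList)
    · intro w hw
      obtain ⟨b, hb, rfl⟩ := List.mem_map.1 hw
      exact hlen b hb
    · intro w hw ch hch
      rw [PySem.Set.mem_union, PySem.Set.mem_ofList]
      exact Or.inr (List.mem_flatten.2 ⟨w, hw, hch⟩)
    · intro x
      constructor
      · intro hx
        refine ⟨?_, by simp [PySem.Set.empty]⟩
        rw [PySem.Set.mem_ofList] at hx ⊢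
        exact hx
      · rintro ⟨hx, _⟩
        exact hx
    · intro x _
      simp [PySem.Set.empty]
    · intro x; rfl
    · intro x hx
      rw [PySem.Set.mem_ofList] at hx
      exact hx
    · intro g hg
      rw [PySem.Set.mem_ofList] at hg
      rcases List.mem_singleton.1 hg with rfl
      rfl
    · simp [PySem.Set.empty]
    · intro h
      rw [PySem.Set.mem_ofList] at h
      exact hse (List.mem_singleton.1 h).symm
    · intro e he hee
      rw [PySem.Set.mem_ofList] at he
      simp [PySem.Set.empty] at hee
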